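-- pv_equiv track=rewrite | github.com/ThisIsRoy/leetcode | easy/rotated-digits.py | valid_rotate
-- ===== SOURCE A (Python) =====
-- def valid_rotate(n):
--     """
--     Checks if n is valid after rotating each digit
--     """
--     inval_set = set(['3', '4', '7'])
--     changed_set = set(['2', '5', '6', '9'])
--     changed = False
--
--     for char in str(n):
--         if char in inval_set:
--             return False
--
--         elif not changed and char in changed_set:
--             changed = True
--
--     return True if changed else False
-- ===== SOURCE B (Python) =====
-- def valid_rotate(n):
--     rot = {0: 0, 1: 1, 8: 8, 2: 5, 5: 2, 6: 9, 9: 6}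
--     m = abs(n)
--     r, p = 0, 1
--     while True:
--         d = m % 10
--         if d not in rot:
--             return False
--         r += rot[d] * p
--         p *= 10
--         m //= 10
--         if m == 0:
--             break
--     return r != abs(n)
-- ===== Notes on version B (the rewrite author's own statement) =====
-- stated objective: alternative
-- what changed: Instead of scanning the characters of str(n) with an early-return and a 'changed' flag, B works arithmetically on abs(n): it peels digits with % and //, maps each through a rotation dictionary (failing on 3/4/7), reconstructs the rotated number positionally, and answers by comparing the rotated number with the original.
import Mathlib
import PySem

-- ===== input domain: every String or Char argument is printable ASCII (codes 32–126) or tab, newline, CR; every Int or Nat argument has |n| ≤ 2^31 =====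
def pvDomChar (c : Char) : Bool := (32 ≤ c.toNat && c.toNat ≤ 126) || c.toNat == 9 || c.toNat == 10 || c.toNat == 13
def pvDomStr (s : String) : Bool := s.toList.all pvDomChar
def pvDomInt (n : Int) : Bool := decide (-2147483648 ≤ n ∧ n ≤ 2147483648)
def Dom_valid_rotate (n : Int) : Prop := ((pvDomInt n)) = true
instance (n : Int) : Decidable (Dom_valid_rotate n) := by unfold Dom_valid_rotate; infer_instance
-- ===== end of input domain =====

-- B replaces A's character scan of str(n) by arithmetic digit peeling of abs(n): it maps each
-- digit through a rotation table, rebuilds the rotated number positionally and compares it with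
-- the original (objective: alternative algorithm, same cost).

-- ===== PORT A =====
-- A's loop over str(n): first invalid digit returns False; a changing digit sets the flag.
def validRotateLoop (cs : List Char) (changed : Bool) : Bool :=
  match cs with
  | [] => if changed then true else false
  | c :: rest =>
    if PySem.Set.contains (PySem.Set.ofList ['3', '4', '7']) c then false
    else if !changed && PySem.Set.contains (PySem.Set.ofList ['2', '5', '6', '9']) c then
      validRotateLoop rest true
    else validRotateLoop rest changed

def valid_rotate (n : Int) : Bool :=
  validRotateLoop (PySem.Int.toChars n) false

-- ===== PORT B =====
-- the Python dict rot = {0:0, 1:1, 8:8, 2:5, 5:2, 6:9, 9:6}; its keys/values are the digit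
-- values of abs(n), always nonnegative, so they are carried as Nat here.
def rotMap : PySem.Dict Nat Nat :=
  PySem.Dict.ofList [(0, 0), (1, 1), (8, 8), (2, 5), (5, 2), (6, 9), (9, 6)]

-- B's while-True loop over m = abs(n) ≥ 0; on nonnegative ints Python's % 10 and // 10 are
-- exactly Nat.mod / Nat.div, so the loop state (m, r, p) is carried as Nat.
def rotLoop (m r p : Nat) : Option Nat :=
  match PySem.Dict.get? rotMap (m % 10) with
  | none => none
  | some v =>
    if m / 10 = 0 then some (r + v * p)
    else rotLoop (m / 10) (r + v * p) (p * 10)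
termination_by m
decreasing_by
  exact Nat.div_lt_self (Nat.pos_of_ne_zero (by intro h; simp [h] at *)) (by norm_num)

def valid_rotate_alt (n : Int) : Bool :=
  match rotLoop n.natAbs 0 1 with
  | none => false
  | some r => decide (r ≠ n.natAbs)

-- ===== PRECONDITION & SPEC =====
def Spec_valid_rotate (n : Int) (out : Bool) : Prop := out = valid_rotate_alt n
instance (n : Int) (out : Bool) : Decidable (Spec_valid_rotate n out) := by unfold Spec_valid_rotate; infer_instance

-- ===== CLAIM (what is proved, stated in full; the proofs are below) =====
def Claim_equal_valid_rotate : Prop := ∀ (n : Int), Dom_valid_rotate n → Spec_valid_rotate n (valid_rotate n)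

-- ===== LEMMAS AND PROOFS =====

-- proof-only helpers: the decimal digit characters of m, and digit-level recursions mirroring
-- rotLoop's do-while shape.
def digitsChars (m : Nat) : List Char :=
  if m / 10 = 0 then [(m % 10).digitChar]
  else digitsChars (m / 10) ++ [(m % 10).digitChar]
termination_by m
decreasing_by
  exact Nat.div_lt_self (Nat.pos_of_ne_zero (by intro h; simp [h] at *)) (by norm_num)

def goodDigits (m : Nat) : Bool :=
  (PySem.Dict.get? rotMap (m % 10)).isSome &&
    (if m / 10 = 0 then true else goodDigits (m / 10))
termination_by m
decreasing_by
  exact Nat.div_lt_self (Nat.pos_of_ne_zero (by intro h; simp [h] at *)) (by norm_num)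

def changedDigits (m : Nat) : Bool :=
  decide (m % 10 ∈ [2, 5, 6, 9]) ||
    (if m / 10 = 0 then false else changedDigits (m / 10))
termination_by m
decreasing_by
  exact Nat.div_lt_self (Nat.pos_of_ne_zero (by intro h; simp [h] at *)) (by norm_num)

def rotNum (m : Nat) : Nat :=
  (PySem.Dict.get? rotMap (m % 10)).getD 0 +
    10 * (if m / 10 = 0 then 0 else rotNum (m / 10))
termination_by m
decreasing_by
  exact Nat.div_lt_self (Nat.pos_of_ne_zero (by intro h; simp [h] at *)) (by norm_num)

-- A's loop computes: False if any invalid digit occurs anywhere, else whether the flag is or becomes set.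
theorem validRotateLoop_char (cs : List Char) (changed : Bool) :
    validRotateLoop cs changed =
      if cs.any (fun c => decide (c ∈ ['3', '4', '7'])) then false
      else changed || cs.any (fun c => decide (c ∈ ['2', '5', '6', '9'])) := by
  induction cs generalizing changed with
  | nil => cases changed <;> simp [validRotateLoop]
  | cons c rest ih =>
    simp only [validRotateLoop, List.any_cons]
    by_cases h1 : c ∈ ['3', '4', '7']
    · simp [h1]
    · by_cases h2 : c ∈ ['2', '5', '6', '9']
      · cases changed <;> simp [ih, h1, h2]
      · cases changed <;> simp [ih, h1, h2]

-- Nat.toDigits via the fuel-free recursion digitsChars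
theorem toDigitsCore_eq (fuel : Nat) : ∀ (n : Nat) (ds : List Char), n < fuel →
    Nat.toDigitsCore 10 fuel n ds = digitsChars n ++ ds := by
  induction fuel with
  | zero => intro n ds h; omega
  | succ fuel ih =>
    intro n ds h
    rw [Nat.toDigitsCore, digitsChars]
    by_cases h0 : n / 10 = 0
    · simp [h0]
    · have hn : 0 < n := Nat.pos_of_ne_zero (by intro e; simp [e] at h0)
      have : n / 10 < fuel := lt_of_lt_of_le (Nat.div_lt_self hn (by norm_num)) (by omega)
      simp [h0, ih (n / 10) _ this]

theorem toDigits_eq (n : Nat) : Nat.toDigits 10 n = digitsChars n :=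
  (toDigitsCore_eq (n + 1) n [] (by omega)).trans (by simp)

-- digit-level character facts (d = m % 10 < 10)
theorem char_inval (d : Nat) (h : d < 10) :
    decide (d.digitChar ∈ ['3', '4', '7']) = !(PySem.Dict.get? rotMap d).isSome := by
  interval_cases d <;> decide

theorem char_chg (d : Nat) (h : d < 10) :
    decide (d.digitChar ∈ ['2', '5', '6', '9']) = decide (d ∈ [2, 5, 6, 9]) := by
  interval_cases d <;> decide

-- A's two scans over the digit characters, digit by digit
theorem any_inval (m : Nat) :
    (digitsChars m).any (fun c => decide (c ∈ ['3', '4', '7'])) = !goodDigits m := by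
  induction m using digitsChars.induct with
  | case1 m h0 =>
    rw [digitsChars, goodDigits]
    simp only [h0, if_true, reduceIte, List.any_cons, List.any_nil, Bool.or_false, Bool.and_true]
    exact char_inval (m % 10) (by omega)
  | case2 m h0 ih =>
    rw [digitsChars, goodDigits]
    simp only [if_neg h0, List.any_append, List.any_cons, List.any_nil, Bool.or_false, ih,
      char_inval (m % 10) (by omega)]
    cases (PySem.Dict.get? rotMap (m % 10)).isSome <;> cases goodDigits (m / 10) <;> rfl

theorem any_chg (m : Nat) :
    (digitsChars m).any (fun c => decide (c ∈ ['2', '5', '6', '9'])) = changedDigits m := by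
  induction m using digitsChars.induct with
  | case1 m h0 =>
    rw [digitsChars, changedDigits]
    simp only [h0, if_true, reduceIte, List.any_cons, List.any_nil, Bool.or_false]
    exact char_chg (m % 10) (by omega)
  | case2 m h0 ih =>
    rw [digitsChars, changedDigits]
    simp only [if_neg h0, List.any_append, List.any_cons, List.any_nil, Bool.or_false, ih,
      char_chg (m % 10) (by omega)]
    cases changedDigits (m / 10) <;> cases (decide (m % 10 ∈ [2, 5, 6, 9])) <;> rfl

-- B's loop in closed form
theorem rotLoop_eq (m : Nat) : ∀ (r p : Nat),
    rotLoop m r p = if goodDigits m then some (r + rotNum m * p) else none := by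
  induction m using digitsChars.induct with
  | case1 m h0 =>
    intro r p
    rw [rotLoop, goodDigits, rotNum]
    cases hv : PySem.Dict.get? rotMap (m % 10) <;> simp [h0, hv, Nat.mul_comm]
  | case2 m h0 ih =>
    intro r p
    rw [rotLoop, goodDigits, rotNum]
    cases hv : PySem.Dict.get? rotMap (m % 10) with
    | none => simp [hv]
    | some v =>
      simp only [hv, h0, if_neg h0, ih, Option.isSome_some, Bool.true_and]
      cases hg : goodDigits (m / 10) <;> simp [Nat.mul_add, Nat.add_mul, Nat.mul_comm, Nat.mul_left_comm]
      ring_nf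

-- the rotation map evaluated at each digit
theorem get_rot0 : PySem.Dict.get? rotMap 0 = some 0 := by decide
theorem get_rot1 : PySem.Dict.get? rotMap 1 = some 1 := by decide
theorem get_rot2 : PySem.Dict.get? rotMap 2 = some 5 := by decide
theorem get_rot3 : PySem.Dict.get? rotMap 3 = none := by decide
theorem get_rot4 : PySem.Dict.get? rotMap 4 = none := by decide
theorem get_rot5 : PySem.Dict.get? rotMap 5 = some 2 := by decide
theorem get_rot6 : PySem.Dict.get? rotMap 6 = some 9 := by decide
theorem get_rot7 : PySem.Dict.get? rotMap 7 = none := by decide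
theorem get_rot8 : PySem.Dict.get? rotMap 8 = some 8 := by decide
theorem get_rot9 : PySem.Dict.get? rotMap 9 = some 6 := by decide

-- per-digit value facts of the rotation map
theorem rot_lt (d v : Nat) (h : d < 10) (hv : PySem.Dict.get? rotMap d = some v) : v < 10 := by
  interval_cases d <;>
    simp_all [get_rot0, get_rot1, get_rot2, get_rot3, get_rot4, get_rot5, get_rot6, get_rot7,
      get_rot8, get_rot9] <;> omega

theorem rot_fixed (d v : Nat) (h : d < 10) (hv : PySem.Dict.get? rotMap d = some v) :
    v = d ↔ d ∉ [2, 5, 6, 9] := by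
  interval_cases d <;>
    simp_all [get_rot0, get_rot1, get_rot2, get_rot3, get_rot4, get_rot5, get_rot6, get_rot7,
      get_rot8, get_rot9] <;> omega

-- when all digits are valid, the rotated number equals the original iff no digit changed
theorem rotNum_eq_iff (m : Nat) (hg : goodDigits m = true) :
    (rotNum m = m) ↔ changedDigits m = false := by
  induction m using digitsChars.induct with
  | case1 m h0 =>
    rw [goodDigits] at hg
    rw [rotNum, changedDigits]
    simp only [h0, if_true, Bool.or_false, Nat.mul_zero, Nat.add_zero]
    obtain ⟨v, hv⟩ := Option.isSome_iff_exists.mp (by simpa [h0] using hg)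
    have hm : m % 10 = m := by omega
    rw [hm] at hv ⊢
    have := rot_fixed m v (by omega) hv
    rw [hv]
    simp only [Option.getD_some]
    rw [this]
    cases hd : decide (m ∈ [2, 5, 6, 9]) <;> simp_all
  | case2 m h0 ih =>
    rw [goodDigits] at hg
    simp only [h0, if_neg h0, Bool.and_eq_true] at hg
    obtain ⟨v, hv⟩ := Option.isSome_iff_exists.mp hg.1
    rw [rotNum, changedDigits]
    simp only [hv, if_neg h0, Option.getD_some]
    have hlt : v < 10 := rot_lt _ _ (by omega) hv
    have hfix := rot_fixed _ _ (by omega) hv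
    have hmod : m % 10 < 10 := by omega
    have hsplit : (v + 10 * rotNum (m / 10) = m) ↔ (v = m % 10 ∧ rotNum (m / 10) = m / 10) := by
      constructor
      · intro he
        have hm : m = m % 10 + 10 * (m / 10) := (Nat.mod_add_div m 10).symm
        omega
      · intro ⟨h1, h2⟩
        have hm : m = m % 10 + 10 * (m / 10) := (Nat.mod_add_div m 10).symm
        omega
    rw [hsplit, ih hg.2, hfix]
    cases hc : changedDigits (m / 10) <;> cases hd : decide (m % 10 ∈ [2, 5, 6, 9]) <;>
      simp_all

-- ===== VERDICT (by name: the statement is the Claim_ definition above) =====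
theorem valid_rotate_spec : Claim_equal_valid_rotate := by
  intro n _
  unfold Spec_valid_rotate valid_rotate valid_rotate_alt
  have hchars : PySem.Int.toChars n =
      (if n < 0 then ['-'] else []) ++ digitsChars n.natAbs := by
    unfold PySem.Int.toChars
    by_cases hn : n < 0
    · simp [hn, toDigits_eq]
    · have : n.toNat = n.natAbs := by omega
      simp [hn, this, toDigits_eq]
  rw [hchars, validRotateLoop_char, rotLoop_eq]
  have hminus : ∀ (L : List Char),
      ((if n < 0 then ['-'] else []) ++ L).any (fun c => decide (c ∈ ['3', '4', '7'])) =
        L.any (fun c => decide (c ∈ ['3', '4', '7'])) ∧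
      ((if n < 0 then ['-'] else []) ++ L).any (fun c => decide (c ∈ ['2', '5', '6', '9'])) =
        L.any (fun c => decide (c ∈ ['2', '5', '6', '9'])) := by
    intro L; by_cases hn : n < 0 <;> simp [hn]
  rw [(hminus _).1, (hminus _).2, any_inval, any_chg]
  cases hg : goodDigits n.natAbs with
  | false => simp
  | true =>
    simp only [Bool.not_true, if_false, Bool.false_eq_true, Nat.zero_add, Nat.mul_one, if_true]
    have := rotNum_eq_iff n.natAbs hg
    cases hc : changedDigits n.natAbs <;> simp_all
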